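-- pv_equiv track=rewrite | github.com/wdomitrz/dotfiles_public | .local/bin/i3status_wrapper.py | add_no_internet_info
-- ===== SOURCE A (Python) =====
-- def add_no_internet_info(old_blocks: list[dict]) -> list[dict]:
--     def is_internet_block(block: dict) -> bool:
--         return block.get("name") in ["ipv6", "wireless", "ethernet"]
--
--     internet_blocks = list(filter(is_internet_block, old_blocks))
--
--     if len(internet_blocks) == 0:
--         return old_blocks
--
--     if any(x.get("full_text") is not None for x in internet_blocks):
--         return old_blocks
--
--     for i, old_block in enumerate(old_blocks):
--         if is_internet_block(old_block):
--             old_blocks[i]["full_text"] = "⛔"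
--             break
--
--     return old_blocks
-- ===== SOURCE B (Python) =====
-- def add_no_internet_info(old_blocks: list[dict]) -> list[dict]:
--     # Single pass: remember the index of the first internet block and whether
--     # any internet block already shows text; then patch that one block in place.
--     first_internet_index = -1
--     found_text = False
--     for i, block in enumerate(old_blocks):
--         if block.get("name") in ("ipv6", "wireless", "ethernet"):
--             if first_internet_index == -1:
--                 first_internet_index = i
--             if block.get("full_text") is not None:
--                 found_text = True
--     if first_internet_index >= 0 and not found_text:
--         old_blocks[first_internet_index]["full_text"] = "⛔"
--     return old_blocks
-- ===== Notes on version B (the rewrite author's own statement) =====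
-- stated objective: alternative
-- what changed: Replaces A's three traversals (filter, any-scan, and a second enumerate loop with break) by one pass that records the first internet block's index and a found-text flag, then patches that single index.
import Mathlib
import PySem

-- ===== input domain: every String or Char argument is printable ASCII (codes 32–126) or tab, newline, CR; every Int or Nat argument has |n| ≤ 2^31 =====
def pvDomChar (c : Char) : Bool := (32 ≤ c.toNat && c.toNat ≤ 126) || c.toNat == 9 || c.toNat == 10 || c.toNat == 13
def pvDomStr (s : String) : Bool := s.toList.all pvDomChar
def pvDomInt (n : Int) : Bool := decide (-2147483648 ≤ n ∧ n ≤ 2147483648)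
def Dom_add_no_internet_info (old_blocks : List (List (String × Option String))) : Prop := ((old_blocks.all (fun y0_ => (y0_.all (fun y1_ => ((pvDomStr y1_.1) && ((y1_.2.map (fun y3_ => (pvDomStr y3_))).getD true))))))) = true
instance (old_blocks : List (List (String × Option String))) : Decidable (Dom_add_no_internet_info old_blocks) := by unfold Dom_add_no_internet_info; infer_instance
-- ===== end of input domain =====

-- B fuses A's three traversals (filter, any-scan, marking loop) into one pass; equivalence is
-- about the RETURN value only (the Python A and B both mutate old_blocks/its first internet dict in place).

-- ===== PORT A =====
-- block.get("name") in ["ipv6","wireless","ethernet"]  (dict .get default None = PySem.Dict.getD _ _ none)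
def pvIsInternetBlock (block : List (String × Option String)) : Bool :=
  decide (PySem.Dict.getD (PySem.Dict.mk block) "name" none ∈ [some "ipv6", some "wireless", some "ethernet"])

-- x.get("full_text") is not None
def pvHasText (block : List (String × Option String)) : Bool :=
  (PySem.Dict.getD (PySem.Dict.mk block) "full_text" none).isSome

-- old_blocks[i]["full_text"] = "⛔"  on one dict
def pvMark (block : List (String × Option String)) : List (String × Option String) :=
  (PySem.Dict.insert (PySem.Dict.mk block) "full_text" (some "⛔")).items

-- A's final 'for i, old_block in enumerate(...): if internet: assign; break' loop
def pvMarkFirst : List (List (String × Option String)) → List (List (String × Option String))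
  | [] => []
  | b :: rest => if pvIsInternetBlock b then pvMark b :: rest else b :: pvMarkFirst rest

def add_no_internet_info (old_blocks : List (List (String × Option String))) : List (List (String × Option String)) :=
  let internet_blocks := old_blocks.filter pvIsInternetBlock
  if internet_blocks.length = 0 then old_blocks
  else if internet_blocks.any pvHasText then old_blocks
  else pvMarkFirst old_blocks

-- ===== PORT B =====
-- Source B's single for-loop over enumerate(old_blocks), state (first_internet_index, found_text)
def pvAltLoop : List (List (String × Option String)) → Int → Int → Bool → Int × Bool
  | [], _, first, found => (first, found)
  | b :: rest, i, first, found =>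
    if pvIsInternetBlock b then
      pvAltLoop rest (i + 1) (if first = -1 then i else first) (found || pvHasText b)
    else
      pvAltLoop rest (i + 1) first found

def add_no_internet_info_alt (old_blocks : List (List (String × Option String))) : List (List (String × Option String)) :=
  let st := pvAltLoop old_blocks 0 (-1) false
  if 0 ≤ st.1 ∧ st.2 = false then
    match old_blocks[st.1.toNat]? with   -- index is in range whenever the branch is taken
    | some b => old_blocks.set st.1.toNat (pvMark b)
    | none => old_blocks
  else old_blocks

-- ===== PRECONDITION & SPEC =====
def Spec_add_no_internet_info (old_blocks : List (List (String × Option String))) (out : List (List (String × Option String))) : Prop := out = add_no_internet_info_alt old_blocks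
instance (old_blocks : List (List (String × Option String))) (out : List (List (String × Option String))) : Decidable (Spec_add_no_internet_info old_blocks out) := by unfold Spec_add_no_internet_info; infer_instance

-- ===== CLAIM (what is proved, stated in full; the proofs are below) =====
def Claim_equal_add_no_internet_info : Prop := ∀ (old_blocks : List (List (String × Option String))), Dom_add_no_internet_info old_blocks → Spec_add_no_internet_info old_blocks (add_no_internet_info old_blocks)

-- ===== LEMMAS AND PROOFS =====

-- Once first ≠ -1 it never changes; found accumulates 'any pvHasText' over the internet blocks.
theorem pvAltLoop_fixed (l : List (List (String × Option String))) (i first : Int) (found : Bool)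
    (hf : first ≠ -1) :
    pvAltLoop l i first found = (first, found || (l.filter pvIsInternetBlock).any pvHasText) := by
  induction l generalizing i found with
  | nil => simp [pvAltLoop]
  | cons b rest ih =>
    by_cases hb : pvIsInternetBlock b = true <;>
      simp [pvAltLoop, hb, hf, ih, Bool.or_assoc, List.any_cons]

theorem pvAltLoop_spec (l : List (List (String × Option String))) (i : Int) (hi : 0 ≤ i) :
    pvAltLoop l i (-1) false =
      (if l.filter pvIsInternetBlock = [] then -1 else i + (l.findIdx pvIsInternetBlock : Int),
       (l.filter pvIsInternetBlock).any pvHasText) := by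
  induction l generalizing i with
  | nil => simp [pvAltLoop]
  | cons b rest ih =>
    by_cases hb : pvIsInternetBlock b = true
    · have hne : i ≠ -1 := by omega
      simp [pvAltLoop, hb, pvAltLoop_fixed rest (i + 1) i _ hne, List.any_cons,
        List.findIdx_cons]
    · have hb' : pvIsInternetBlock b = false := by simpa using hb
      rw [pvAltLoop]
      simp only [hb', Bool.false_eq_true, if_false, ih (i+1) (by omega), List.filter_cons,
        List.findIdx_cons, cond_false]
      split
      · simp
      · simp only [Prod.mk.injEq, and_true]
        push_cast
        omega

theorem pvMarkFirst_eq_set (l : List (List (String × Option String)))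
    (h : l.filter pvIsInternetBlock ≠ []) :
    ∃ b, l[l.findIdx pvIsInternetBlock]? = some b ∧
      pvMarkFirst l = l.set (l.findIdx pvIsInternetBlock) (pvMark b) := by
  induction l with
  | nil => simp at h
  | cons b rest ih =>
    by_cases hb : pvIsInternetBlock b = true
    · exact ⟨b, by simp [List.findIdx_cons, hb, pvMarkFirst]⟩
    · have hb' : pvIsInternetBlock b = false := by simpa using hb
      have h' : rest.filter pvIsInternetBlock ≠ [] := by
        simpa [List.filter_cons, hb'] using h
      obtain ⟨c, hc, hm⟩ := ih h'
      exact ⟨c, by simp [List.findIdx_cons, hb', hc, pvMarkFirst, hm]⟩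

-- ===== VERDICT (by name: the statement is the Claim_ definition above) =====
theorem add_no_internet_info_spec : Claim_equal_add_no_internet_info := by
  intro l _
  unfold Spec_add_no_internet_info add_no_internet_info add_no_internet_info_alt
  rw [pvAltLoop_spec l 0 le_rfl]
  by_cases hf : l.filter pvIsInternetBlock = []
  · simp [hf]
  · by_cases ha : (l.filter pvIsInternetBlock).any pvHasText = true
    · simp [hf, ha, List.length_eq_zero_iff]
    · obtain ⟨b, hb, hm⟩ := pvMarkFirst_eq_set l hf
      have ha' : (l.filter pvIsInternetBlock).any pvHasText = false := by simpa using ha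
      simp [hf, ha', List.length_eq_zero_iff, hb, hm]
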